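-- pv_equiv track=rewrite | github.com/namuna309/CodingTestPractice | Programmers/level 2/[3차] 방금그곡/Source.py | solution
-- ===== SOURCE A (Python) =====
-- def transformScore(score):
--     score_list = []
--     for i in range(len(score)):
--         if score[i] == '#':
--             score_list[-1] = score_list[-1].lower()
--         else:
--             score_list.append(score[i])
--
--     return ''.join(score_list)
--
-- def solution(m, musicinfos):
--     equal_list = []
--     cnt = 0
--     sharps = {'C#': 'c',
--                   'D#': 'd',
--                   'F#': 'f',
--                   'G#': 'g',
--                   'A#': 'a'}
--     m = transformScore(m)
--     for i in range(len(musicinfos)):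
--         musicinfo = musicinfos[i].split(',')
--         start_t, end_t = musicinfo[0], musicinfo[1]
--         title = musicinfo[2]
--         score = transformScore(musicinfo[3])
--         e_score = ''
--
--     #   1. 총 몇 분 재생됐는지 구한다
--         start_m, start_s = int(start_t[:2]), int(start_t[-2:])
--         end_m, end_s = int(end_t[:2]), int(end_t[-2:])
--         minute = end_m - start_m
--         sec = end_s - start_s
--         t = minute * 60 + sec
--
--     #   2. 재생된 시간 만큼 악보 정보를 편집한다(채우거나 자른다)
--         if t > len(score):
--             e_score = t // len(score) * score + score[: t % len(score)]
--         else: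
--             e_score = score[:t]
--
--     #   3. 편집된 음악안에 기억한 멜로디가 있는지 확인한다
--         if m in e_score:
--             equal_list.append((t, cnt, title))
--             cnt += 1
--
--     if len(equal_list):
--         equal_list.sort(key = lambda x: (-x[0], x[1]))
--         return equal_list[0][2]
--
-- #   4. 있으면 해당된 제목을 반환하고 없으면 "(None)"을 반환한다
--     return '(None)'
-- ===== SOURCE B (Python) =====
-- def transformScore(score):
--     score_list = []
--     for i in range(len(score)):
--         if score[i] == '#':
--             score_list[-1] = score_list[-1].lower()
--         else:
--             score_list.append(score[i])
--
--     return ''.join(score_list)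
--
--
-- def solution(m, musicinfos):
--     m = transformScore(m)
--     found = False
--     best_t = 0
--     best_title = '(None)'
--     for info in musicinfos:
--         parts = info.split(',')
--         start_t, end_t, title = parts[0], parts[1], parts[2]
--         score = transformScore(parts[3])
--         t = (int(end_t[:2]) - int(start_t[:2])) * 60 + (int(end_t[-2:]) - int(start_t[-2:]))
--         if t > len(score):
--             q, r = divmod(t, len(score))
--             e_score = q * score + score[:r]
--         else:
--             e_score = score[:t]
--         if m in e_score and (not found or t > best_t):
--             found, best_t, best_title = True, t, title
--     return best_title
-- ===== Notes on version B (the rewrite author's own statement) =====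
-- stated objective: simpler
-- what changed: B replaces A's collect-all-matches list with counter plus sort-by-(-t,cnt)-and-take-first by a single running-best scan (found flag, strict t > best_t so the earliest longest match wins), so no list, no counter and no sort are needed.
import Mathlib
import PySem

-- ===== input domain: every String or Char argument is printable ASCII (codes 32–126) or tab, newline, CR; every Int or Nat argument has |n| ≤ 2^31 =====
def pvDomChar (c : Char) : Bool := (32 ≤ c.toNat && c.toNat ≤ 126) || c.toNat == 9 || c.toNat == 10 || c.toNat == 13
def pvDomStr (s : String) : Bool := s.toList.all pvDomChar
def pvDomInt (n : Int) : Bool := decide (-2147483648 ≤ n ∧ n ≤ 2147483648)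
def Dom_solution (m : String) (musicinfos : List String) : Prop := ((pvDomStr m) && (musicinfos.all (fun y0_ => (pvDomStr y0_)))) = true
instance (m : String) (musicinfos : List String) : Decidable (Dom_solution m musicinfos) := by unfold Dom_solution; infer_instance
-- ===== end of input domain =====

-- B changes the selection step only: instead of collecting all matches (with a counter) and sorting by
-- (-t, cnt), B keeps a single running best (found flag, strict t > best_t so the earliest longest match wins).

-- ===== PORT A =====
-- transformScore, shared verbatim by A and by B's Source B (score_list[-1] on the empty list raises: Pre_ excludes strings starting with '#')
def tsChars (score : List Char) : List Char :=
  score.foldl (fun acc c =>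
    if c = '#' then
      match acc.getLast? with
      | some l => acc.dropLast ++ [PySem.Chars.lowerChar l]
      | none => acc          -- Python raises IndexError here; excluded by Pre_
    else acc ++ [c]) []

-- the body of A's for-loop (state: equal_list, cnt)
def solutionStep (mt : List Char) (st : List (Int × Int × String) × Int) (info : String) :
    List (Int × Int × String) × Int :=
  let parts := (PySem.Str.split? info ",").getD []
  let start_t := (PySem.List.pyGetD parts 0 "").toList
  let end_t := (PySem.List.pyGetD parts 1 "").toList
  let title := PySem.List.pyGetD parts 2 ""
  let score := tsChars (PySem.List.pyGetD parts 3 "").toList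
  let start_m := (PySem.Int.ofChars? (PySem.List.slice start_t none (some 2))).getD 0
  let start_s := (PySem.Int.ofChars? (PySem.List.slice start_t (some (-2)) none)).getD 0
  let end_m := (PySem.Int.ofChars? (PySem.List.slice end_t none (some 2))).getD 0
  let end_s := (PySem.Int.ofChars? (PySem.List.slice end_t (some (-2)) none)).getD 0
  let minute := end_m - start_m
  let sec := end_s - start_s
  let t := minute * 60 + sec
  let e_score :=
    if t > (score.length : Int) then
      PySem.List.pyRepeat score (PySem.Int.floordiv t (score.length : Int)) ++
        PySem.List.slice score none (some (PySem.Int.mod t (score.length : Int)))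
    else PySem.List.slice score none (some t)
  if PySem.Chars.isIn mt e_score then (st.1 ++ [(t, st.2, title)], st.2 + 1) else st

def solution (m : String) (musicinfos : List String) : String :=
  let mt := tsChars m.toList
  let final := musicinfos.foldl (solutionStep mt) ([], 0)
  if final.1.length ≠ 0 then
    (PySem.List.pyGetD (PySem.List.sorted2 final.1 (fun x => -x.1) (fun x => x.2.1)) 0 (0, 0, "")).2.2
  else "(None)"

-- ===== PORT B =====
-- the body of B's for-loop (state: found, best_t, best_title)
def solutionAltStep (mt : List Char) (st : Bool × Int × String) (info : String) :
    Bool × Int × String :=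
  let parts := (PySem.Str.split? info ",").getD []
  let start_t := (PySem.List.pyGetD parts 0 "").toList
  let end_t := (PySem.List.pyGetD parts 1 "").toList
  let title := PySem.List.pyGetD parts 2 ""
  let score := tsChars (PySem.List.pyGetD parts 3 "").toList
  let t := ((PySem.Int.ofChars? (PySem.List.slice end_t none (some 2))).getD 0
            - (PySem.Int.ofChars? (PySem.List.slice start_t none (some 2))).getD 0) * 60 +
           ((PySem.Int.ofChars? (PySem.List.slice end_t (some (-2)) none)).getD 0
            - (PySem.Int.ofChars? (PySem.List.slice start_t (some (-2)) none)).getD 0)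
  let e_score :=
    if t > (score.length : Int) then
      let qr := (PySem.Int.divmod? t (score.length : Int)).getD (0, 0)
      PySem.List.pyRepeat score qr.1 ++ PySem.List.slice score none (some qr.2)
    else PySem.List.slice score none (some t)
  if PySem.Chars.isIn mt e_score && (!st.1 || st.2.1 < t) then (true, t, title) else st

def solution_alt (m : String) (musicinfos : List String) : String :=
  let mt := tsChars m.toList
  let final := musicinfos.foldl (solutionAltStep mt) (false, 0, "(None)")
  final.2.2

-- ===== PRECONDITION & SPEC =====
-- Pre_ excludes exactly the inputs where the Python A raises: a melody or 4th comma-field starting with '#'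
-- (IndexError in transformScore), fewer than 4 comma-fields (IndexError), a time field whose first-two or
-- last-two characters do not parse as an int (ValueError), or an effectively empty score played for
-- t > 0 seconds (ZeroDivisionError).
def pvOkInfo (info : String) : Bool :=
  let parts := (PySem.Str.split? info ",").getD []
  let start_t := (PySem.List.pyGetD parts 0 "").toList
  let end_t := (PySem.List.pyGetD parts 1 "").toList
  let raw := (PySem.List.pyGetD parts 3 "").toList
  let sm := PySem.Int.ofChars? (PySem.List.slice start_t none (some 2))
  let ss := PySem.Int.ofChars? (PySem.List.slice start_t (some (-2)) none)
  let em := PySem.Int.ofChars? (PySem.List.slice end_t none (some 2))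
  let es := PySem.Int.ofChars? (PySem.List.slice end_t (some (-2)) none)
  let t := (em.getD 0 - sm.getD 0) * 60 + (es.getD 0 - ss.getD 0)
  decide (4 ≤ parts.length) && sm.isSome && ss.isSome && em.isSome && es.isSome &&
    decide (raw.head? ≠ some '#') &&
    (decide (tsChars raw ≠ ([] : List Char)) || decide (t ≤ 0))

def Pre_solution (m : String) (musicinfos : List String) : Prop :=
  m.toList.head? ≠ some '#' ∧ musicinfos.all pvOkInfo = true
instance (m : String) (musicinfos : List String) : Decidable (Pre_solution m musicinfos) := by
  unfold Pre_solution; infer_instance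

def pvWitness_solution : String × List String :=
  ("ABC", ["12:00,12:14,HELLO,C#ABC", "13:00,13:05,WORLD,ABCDEF"])

def Spec_solution (m : String) (musicinfos : List String) (out : String) : Prop := out = solution_alt m musicinfos
instance (m : String) (musicinfos : List String) (out : String) : Decidable (Spec_solution m musicinfos out) := by unfold Spec_solution; infer_instance

-- ===== CLAIM (what is proved, stated in full; the proofs are below) =====
def Claim_equal_solution : Prop := ∀ (m : String) (musicinfos : List String), Dom_solution m musicinfos → Pre_solution m musicinfos → Spec_solution m musicinfos (solution m musicinfos)

-- ===== LEMMAS AND PROOFS =====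

-- B's running best, as a fold over the (t, cnt, title) entries after the first one
def pvSelB (es : List (Int × Int × String)) (b : Int × String) : Int × String :=
  es.foldl (fun b x => if b.1 < x.1 then (x.1, x.2.2) else b) b

-- the relation between A's equal_list and B's (found, best_t, best_title) state
def pvRelB (el : List (Int × Int × String)) (bst : Bool × Int × String) : Prop :=
  match el with
  | [] => bst = (false, 0, "(None)")
  | e :: es => bst = (true, pvSelB es (e.1, e.2.2))

-- the comparison sorted2 uses for key (-t, cnt), reverse=False
def pvBefore (a b : Int × Int × String) : Bool :=
  decide (-a.1 < -b.1) || (!decide (-b.1 < -a.1) && decide (a.2.1 < b.2.1))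

-- the values both loop bodies compute for one entry
def pvT (info : String) : Int :=
  ((PySem.Int.ofChars? (PySem.List.slice (PySem.List.pyGetD ((PySem.Str.split? info ",").getD []) 1 "").toList none (some 2))).getD 0
    - (PySem.Int.ofChars? (PySem.List.slice (PySem.List.pyGetD ((PySem.Str.split? info ",").getD []) 0 "").toList none (some 2))).getD 0) * 60 +
  ((PySem.Int.ofChars? (PySem.List.slice (PySem.List.pyGetD ((PySem.Str.split? info ",").getD []) 1 "").toList (some (-2)) none)).getD 0
    - (PySem.Int.ofChars? (PySem.List.slice (PySem.List.pyGetD ((PySem.Str.split? info ",").getD []) 0 "").toList (some (-2)) none)).getD 0)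

def pvTitle (info : String) : String := PySem.List.pyGetD ((PySem.Str.split? info ",").getD []) 2 ""

def pvE (info : String) : List Char :=
  let score := tsChars (PySem.List.pyGetD ((PySem.Str.split? info ",").getD []) 3 "").toList
  let t := pvT info
  if t > (score.length : Int) then
    PySem.List.pyRepeat score (PySem.Int.floordiv t (score.length : Int)) ++
      PySem.List.slice score none (some (PySem.Int.mod t (score.length : Int)))
  else PySem.List.slice score none (some t)

theorem pvStepA_eq (mt : List Char) (st : List (Int × Int × String) × Int) (info : String) :
    solutionStep mt st info =
      if PySem.Chars.isIn mt (pvE info) then (st.1 ++ [(pvT info, st.2, pvTitle info)], st.2 + 1)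
      else st := rfl

-- B's divmod-based e_score is A's floordiv/mod-based one
theorem pvE_eq (t : Int) (score : List Char) :
    (if t > (score.length : Int) then
        PySem.List.pyRepeat score ((PySem.Int.divmod? t (score.length : Int)).getD (0, 0)).1 ++
          PySem.List.slice score none (some ((PySem.Int.divmod? t (score.length : Int)).getD (0, 0)).2)
      else PySem.List.slice score none (some t)) =
    (if t > (score.length : Int) then
        PySem.List.pyRepeat score (PySem.Int.floordiv t (score.length : Int)) ++
          PySem.List.slice score none (some (PySem.Int.mod t (score.length : Int)))
      else PySem.List.slice score none (some t)) := by
  rcases score with _ | ⟨s, ss⟩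
  · split
    · simp [PySem.List.pyRepeat, PySem.List.slice]
    · rfl
  · have hn : ¬ ((ss.length : Int) + 1 = 0) := by omega
    simp only [PySem.Int.divmod?, PySem.Int.floordiv, PySem.Int.mod, List.length_cons,
      Nat.cast_add, Nat.cast_one, if_neg hn, Option.getD_some]

theorem pvStepB_eq (mt : List Char) (bst : Bool × Int × String) (info : String) :
    solutionAltStep mt bst info =
      if PySem.Chars.isIn mt (pvE info) && (!bst.1 || bst.2.1 < pvT info) then
        (true, pvT info, pvTitle info)
      else bst := by
  unfold solutionAltStep pvE pvT pvTitle
  dsimp only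
  rw [pvE_eq]

theorem pvSelB_append (es : List (Int × Int × String)) (x) (b) :
    pvSelB (es ++ [x]) b =
      (if (pvSelB es b).1 < x.1 then (x.1, x.2.2) else pvSelB es b) := by
  simp [pvSelB, List.foldl_append]

-- the two loops, run in lockstep, keep equal_list and the running best related
theorem pvLoop_rel (mt : List Char) :
    ∀ (l : List String) (el : List (Int × Int × String)) (c : Int) (bst : Bool × Int × String),
    (∀ x ∈ el, x.2.1 < c) → el.Pairwise (fun a b => a.2.1 < b.2.1) → pvRelB el bst →
    (l.foldl (solutionStep mt) (el, c)).1.Pairwise (fun a b => a.2.1 < b.2.1) ∧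
    pvRelB (l.foldl (solutionStep mt) (el, c)).1 (l.foldl (solutionAltStep mt) bst) := by
  intro l
  induction l with
  | nil => intro el c bst _ hpw hrel; exact ⟨hpw, hrel⟩
  | cons info rest ih =>
    intro el c bst hlt hpw hrel
    rw [List.foldl_cons, List.foldl_cons, pvStepA_eq, pvStepB_eq]
    by_cases hin : PySem.Chars.isIn mt (pvE info)
    · simp only [hin, Bool.true_and, reduceIte]
      rcases el with _ | ⟨e, es⟩
      · -- first match: B's found flag flips
        rw [pvRelB] at hrel; subst hrel
        simp only [Bool.not_false, Bool.true_or, reduceIte]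
        refine ih [(pvT info, c, pvTitle info)] (c + 1) _ ?_ ?_ ?_
        · intro x hx; simp only [List.mem_singleton] at hx; subst hx; dsimp only; omega
        · simp
        · rw [pvRelB, pvSelB]; rfl
      · -- later match: B updates iff strictly longer
        rw [pvRelB] at hrel; subst hrel
        simp only [Bool.not_true, Bool.false_or]
        refine ih (e :: (es ++ [(pvT info, c, pvTitle info)])) (c + 1) _ ?_ ?_ ?_
        · intro x hx
          simp only [List.mem_cons, List.mem_append] at hx
          rcases hx with h | h | h | h
          · have := hlt e (by simp); subst h; omega
          · have := hlt x (by simp [h]); omega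
          · subst h; dsimp only; omega
          · simp at h
        · rw [List.pairwise_cons] at hpw ⊢
          constructor
          · intro x hx
            simp only [List.mem_append, List.mem_singleton] at hx
            rcases hx with h | h
            · exact hpw.1 x h
            · have := hlt e (by simp); subst h; dsimp only; omega
          · rw [List.pairwise_append]
            refine ⟨hpw.2, by simp, ?_⟩
            intro x hx y hy
            simp only [List.mem_singleton] at hy
            have := hlt x (by simp [hx]); subst hy; dsimp only; omega
        · rw [pvRelB, pvSelB_append]
          rcases h : decide ((pvSelB es (e.1, e.2.2)).1 < pvT info) with _ | _
          · simp only [decide_eq_false_iff_not] at h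
            rw [if_neg (by simpa using h), if_neg h]
          · simp only [decide_eq_true_eq] at h
            rw [if_pos (by simpa using h), if_pos h]
    · simp only [hin, Bool.false_and, Bool.false_eq_true, reduceIte]
      exact ih el c bst hlt hpw hrel

-- the head of a fold of insertBy is the pvBefore-scan of the inserted elements
theorem pvHead_foldl_insertBy (es : List (Int × Int × String)) :
    ∀ (acc : List (Int × Int × String)) (h : Int × Int × String), acc.head? = some h →
    (es.foldl (fun a x => PySem.List.insertBy pvBefore x a) acc).head? =
      some (es.foldl (fun b x => if pvBefore x b then x else b) h) := by
  induction es with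
  | nil => intro acc h hh; simpa using hh
  | cons x rest ih =>
    intro acc h hh
    rcases acc with _ | ⟨a, tl⟩
    · simp at hh
    · simp only [List.head?_cons, Option.some.injEq] at hh; subst hh
      rw [List.foldl_cons, List.foldl_cons]
      have hins : PySem.List.insertBy pvBefore x (a :: tl) =
          if pvBefore x a then x :: a :: tl else a :: PySem.List.insertBy pvBefore x tl := by
        simp [PySem.List.insertBy]
      rw [hins]
      by_cases hb : pvBefore x a
      · rw [if_pos hb, if_pos hb]; exact ih _ _ rfl
      · rw [if_neg hb, if_neg hb]; exact ih _ _ rfl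

-- on a cnt-increasing list the pvBefore-scan is exactly B's strict running best
theorem pvScan_proj (es : List (Int × Int × String)) :
    ∀ (b : Int × Int × String), (∀ x ∈ es, b.2.1 < x.2.1) →
    es.Pairwise (fun a b => a.2.1 < b.2.1) →
    ((es.foldl (fun b x => if pvBefore x b then x else b) b).1,
     (es.foldl (fun b x => if pvBefore x b then x else b) b).2.2) = pvSelB es (b.1, b.2.2) := by
  induction es with
  | nil => intro b _ _; rfl
  | cons x rest ih =>
    intro b hcnt hpw
    rw [List.foldl_cons]
    have hx : b.2.1 < x.2.1 := hcnt x (by simp)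
    have hbe : pvBefore x b = decide (b.1 < x.1) := by
      rw [pvBefore]
      rcases h : decide (b.1 < x.1) with _ | _ <;> simp_all <;> omega
    rw [List.pairwise_cons] at hpw
    rw [pvSelB]
    by_cases hlt : b.1 < x.1
    · rw [hbe, if_pos (by simp [hlt]), List.foldl_cons, if_pos hlt]
      have := ih x hpw.1 hpw.2
      rw [pvSelB] at this
      exact this
    · rw [hbe, if_neg (by simp [hlt]), List.foldl_cons, if_neg hlt]
      have := ih b (fun y hy => lt_trans hx (hpw.1 y hy)) hpw.2
      rw [pvSelB] at this
      exact this

theorem solution_eq_alt (m : String) (musicinfos : List String) :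
    solution m musicinfos = solution_alt m musicinfos := by
  unfold solution solution_alt
  dsimp only
  obtain ⟨hpw, hrel⟩ := pvLoop_rel (tsChars m.toList) musicinfos [] 0 (false, 0, "(None)")
    (by simp) (by simp) rfl
  set resA := musicinfos.foldl (solutionStep (tsChars m.toList)) ([], 0) with hA
  set resB := musicinfos.foldl (solutionAltStep (tsChars m.toList)) (false, 0, "(None)") with hB
  rcases hel : resA.1 with _ | ⟨e, es⟩
  · rw [hel] at hrel
    rw [pvRelB] at hrel
    rw [hrel]
    simp
  · rw [hel] at hrel hpw
    rw [pvRelB] at hrel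
    rw [if_pos (by simp)]
    have hs2 : PySem.List.sorted2 (e :: es) (fun x => -x.1) (fun x => x.2.1) =
        (e :: es).foldl (fun acc x => PySem.List.insertBy pvBefore x acc) [] := rfl
    have hins0 : PySem.List.insertBy pvBefore e [] = [e] := by simp [PySem.List.insertBy]
    have hhead := pvHead_foldl_insertBy es [e] e rfl
    rw [List.pairwise_cons] at hpw
    have hproj := pvScan_proj es e hpw.1 hpw.2
    rw [hs2, List.foldl_cons, hins0]
    set sorted := es.foldl (fun a x => PySem.List.insertBy pvBefore x a) [e] with hsorted
    rcases hso : sorted with _ | ⟨s0, stl⟩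
    · rw [hso] at hhead; simp at hhead
    · rw [hso] at hhead
      simp only [List.head?_cons, Option.some.injEq] at hhead
      have h0 : PySem.List.pyGetD (s0 :: stl) 0 ((0 : Int), (0 : Int), "") = s0 := by
        simp [PySem.List.pyGetD]
      rw [h0, hrel, hhead]
      have := congrArg Prod.snd hproj
      simpa using this

-- ===== VERDICT (by name: the statement is the Claim_ definition above) =====
theorem solution_spec : Claim_equal_solution := by
  intro m musicinfos _ _
  unfold Spec_solution
  exact solution_eq_alt m musicinfos
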